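-- pv_equiv track=rewrite | github.com/mastermayur007/CODE_WITH_HARRY | DAY-05/X+Y/main.py | transfrom
-- ===== SOURCE A (Python) =====
-- def transfrom(b):
--     for i in range(len(b)-1):
--         if b[i]=='1':
--             b[i]='0'
--             if b[i+1]=='0':
--                 b[i+1]='1'
--             else:
--                 b[i+1]='1'
--     return b
-- ===== SOURCE B (Python) =====
-- def transfrom(b):
--     n = len(b)
--     for p in range(n - 1):
--         if b[p] == '1':
--             b[p:] = ['0'] * (n - 1 - p) + ['1']
--             break
--     return b
-- ===== Notes on version B (the rewrite author's own statement) =====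
-- stated objective: alternative
-- what changed: Replaces A's element-by-element carry propagation (rewriting every cell from the first '1' onward one index at a time) with a find-first-'1'-then-single-slice-assignment: locate the first '1' among b[:-1], then overwrite b[p:] with zeros plus a trailing '1' in one step.
import Mathlib
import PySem

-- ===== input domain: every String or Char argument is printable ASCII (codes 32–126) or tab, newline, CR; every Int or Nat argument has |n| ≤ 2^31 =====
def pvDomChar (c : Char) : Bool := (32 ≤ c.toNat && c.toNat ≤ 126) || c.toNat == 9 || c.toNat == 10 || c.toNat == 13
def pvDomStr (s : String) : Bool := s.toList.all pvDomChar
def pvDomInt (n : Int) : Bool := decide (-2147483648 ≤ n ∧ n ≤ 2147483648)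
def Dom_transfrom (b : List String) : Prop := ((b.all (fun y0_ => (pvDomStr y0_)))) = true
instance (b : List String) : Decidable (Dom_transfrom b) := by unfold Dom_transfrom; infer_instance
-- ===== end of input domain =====

-- B replaces A's one-cell-at-a-time carry propagation with find-first-'1' then one slice assignment
-- (alternative decomposition, same cost). Both mutate the list in place in Python; equality here is
-- about the returned value.

-- ===== PORT A =====
-- indices i and i+1 are always in range (0 ≤ i < len(b)-1), so List.set/getD are exact here
def transfrom (b : List String) : List String :=
  (PySem.List.pyRange 0 ((b.length : Int) - 1) 1).foldl
    (fun l i =>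
      if PySem.List.pyGetD l i "" = "1" then
        let l1 := l.set i.toNat "0"
        if PySem.List.pyGetD l1 (i + 1) "" = "0" then l1.set (i + 1).toNat "1"
        else l1.set (i + 1).toNat "1"
      else l) b

-- ===== PORT B =====
def transfrom_alt (b : List String) : List String :=
  let n := b.length
  match (b.take (n - 1)).findIdx? (· == "1") with
  | none => b
  | some p => b.take p ++ List.replicate (n - 1 - p) "0" ++ ["1"]

-- ===== PRECONDITION & SPEC =====
def Spec_transfrom (b : List String) (out : List String) : Prop := out = transfrom_alt b
instance (b : List String) (out : List String) : Decidable (Spec_transfrom b out) := by unfold Spec_transfrom; infer_instance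

-- ===== CLAIM (what is proved, stated in full; the proofs are below) =====
def Claim_equal_transfrom : Prop := ∀ (b : List String), Dom_transfrom b → Spec_transfrom b (transfrom b)

-- ===== LEMMAS AND PROOFS =====

-- the loop body of A with a Nat index
def stepA (l : List String) (k : Nat) : List String :=
  if l.getD k "" = "1" then (l.set k "0").set (k + 1) "1" else l

-- state of A's loop after processing indices 0..k-1
def stA (b : List String) (k : Nat) : List String :=
  match (b.take k).findIdx? (· == "1") with
  | none => b
  | some p => b.take p ++ List.replicate (k - p) "0" ++ "1" :: b.drop (k + 1)

theorem stA_zero (b : List String) : stA b 0 = b := by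
  simp [stA]

theorem findIdx?_take_succ (b : List String) (k : Nat) (hk : k < b.length) :
    (b.take (k + 1)).findIdx? (· == "1") =
      ((b.take k).findIdx? (· == "1")).or
        (if b[k] == "1" then some k else none) := by
  rw [List.take_add_one, List.getElem?_eq_getElem hk, List.findIdx?_append]
  congr 1
  split <;> simp_all [List.findIdx?_cons, Nat.min_eq_left hk.le]

theorem stA_step (b : List String) (k : Nat) (hk : k + 1 < b.length) :
    stepA (stA b k) k = stA b (k + 1) := by
  have hkl : k < b.length := Nat.lt_of_succ_lt hk
  rw [stA, stA, findIdx?_take_succ b k hkl]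
  have hdrop2 : b.drop (k + 1) = b[k+1] :: b.drop (k + 2) := List.drop_eq_getElem_cons hk
  cases h : (b.take k).findIdx? (· == "1") with
  | none =>
      have hgd : b.getD k "" = b[k] := List.getD_eq_getElem b "" hkl
      simp only [Option.none_or, stepA, hgd]
      by_cases h1 : b[k] = "1"
      · simp only [h1, beq_self_eq_true, if_true]
        rw [List.set_eq_take_cons_drop _ hkl,
            List.set_append_right _ _ (by simp [Nat.min_eq_left hkl.le]),
            hdrop2]
        have hlenk : (List.take k b).length = k := by simp [Nat.min_eq_left hkl.le]
        simp [hlenk, show k + 1 - k = 1 from by omega]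
        rw [hdrop2]
        rfl
      · simp [h1]
  | some p =>
      have hp := List.findIdx?_eq_some_iff_findIdx_eq.mp h
      have hpk : p < k := by
        have := hp.1; simpa [Nat.min_eq_left hkl.le] using this
      have hpb : p < b.length := hpk.trans hkl
      have hlen_take : (b.take p).length = p := by
        simp [Nat.min_eq_left hpb.le]
      simp only [Option.some_or, stepA]
      have hgd : (b.take p ++ List.replicate (k - p) "0" ++ "1" :: b.drop (k + 1)).getD k "" = "1" := by
        rw [List.append_assoc,
            List.getD_append_right _ _ _ _ (by omega : (b.take p).length ≤ k),
            List.getD_append_right _ _ _ _ (by simp [hlen_take])]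
        simp [hlen_take]
      rw [hgd, if_pos rfl]
      rw [List.append_assoc,
          List.set_append_right _ _ (by omega : (b.take p).length ≤ k),
          List.set_append_right _ _ (by simp [hlen_take] : (List.replicate (k - p) "0").length ≤ k - (b.take p).length)]
      simp only [hlen_take, List.length_replicate]
      have h0 : k - p - (k - p) = 0 := Nat.sub_self _
      rw [h0, List.set_cons_zero,
          show List.replicate (k - p) "0" ++ "0" :: List.drop (k + 1) b
             = List.replicate (k - p + 1) "0" ++ List.drop (k + 1) b from by
            simp [List.replicate_succ'],
          List.set_append_right _ _ (by rw [hlen_take]; omega),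
          List.set_append_right _ _ (by simp [hlen_take]; omega),
          hdrop2]
      simp [hlen_take, show k - p + 1 = k + 1 - p from by omega]
      rw [hdrop2]
      rfl

theorem foldl_stepA (b : List String) (k : Nat) (hk : k ≤ b.length - 1) :
    (List.range k).foldl stepA b = stA b k := by
  induction k with
  | zero => simp [stA_zero]
  | succ n ih =>
      rw [List.range_succ, List.foldl_append, ih (Nat.le_of_succ_le hk)]
      simp only [List.foldl_cons, List.foldl_nil]
      exact stA_step b n (by omega)

theorem transfrom_eq_foldl (b : List String) :
    transfrom b = (List.range (b.length - 1)).foldl stepA b := by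
  unfold transfrom
  rw [PySem.List.pyRange_one, List.foldl_map]
  have hto : (((b.length : Int) - 1) - 0).toNat = b.length - 1 := by omega
  rw [hto]
  congr 1
  funext l k
  simp [stepA, PySem.List.pyGetD_natCast, ite_self]

-- ===== VERDICT (by name: the statement is the Claim_ definition above) =====
theorem transfrom_spec : Claim_equal_transfrom := by
  intro b _
  unfold Spec_transfrom
  rw [transfrom_eq_foldl, foldl_stepA b (b.length - 1) le_rfl]
  unfold stA transfrom_alt
  cases h : (b.take (b.length - 1)).findIdx? (· == "1") with
  | none => simp [h]
  | some p =>
      have hnil : b.drop (b.length - 1 + 1) = [] :=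
        List.drop_eq_nil_of_le (by omega)
      simp [h, hnil]
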